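-- pv_equiv track=rewrite | github.com/captainbeeheart/pynfc15693demod | sig_tool/sig.py | clock_sync_frames
-- ===== SOURCE A (Python) =====
-- def clock_sync_frames(data, clock_period, min_sync_len, max_sinc_len):
--
-- 	frame_start = []
-- 	before_sample = data[0]
-- 	edge_count = 0
-- 	edge_offset = 0
-- 	prev_edge_offset = 0
-- 	current_offset = 1
--
-- 	for sample in data[1:]:
-- 		# Track rising edge :
-- 		if (before_sample < 0) and (sample > 0):
-- 			prev_edge_offset = edge_offset
-- 			edge_offset = current_offset
-- 			distance = edge_offset - prev_edge_offset
-- 			if distance > int(clock_period * 1.2) and (edge_count >= min_sync_len) and min_sync_len <= max_sinc_len :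
-- 				# End Sync Bit detected :
-- 				frame_start.append(current_offset-int(clock_period*0.5))
-- 				edge_count = 0
--
-- 			if abs(distance - clock_period) < 2:
-- 				# Rising clock edge case :
-- 				edge_count += 1
-- 			else:
-- 				# Wrong Alarm :
-- 				edge_count = 0
--
-- 		current_offset +=1
-- 		before_sample = sample
--
-- 	return frame_start
-- ===== SOURCE B (Python) =====
-- def clock_sync_frames(data, clock_period, min_sync_len, max_sinc_len):
--     # Stage 1: run-length encode the SIGN of the signal; a rising edge is exactly a
--     # negative-sign run immediately followed by a positive-sign run, located at the
--     # start index of the positive run.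
--     runs = []
--     for i, x in enumerate(data):
--         s = (x > 0) - (x < 0)
--         if not runs or runs[-1][0] != s:
--             runs.append((s, i))
--     edges = [cur[1] for prev, cur in zip(runs, runs[1:]) if prev[0] < 0 and cur[0] > 0]
--     # Stage 2: distances between successive edges (the first edge is measured from 0).
--     dists = [b - a for a, b in zip([0] + edges, edges)]
--     # Stage 3: flag each edge whose preceding gap ends a valid sync run.
--     gap = int(clock_period * 1.2)
--     ok = min_sync_len <= max_sinc_len
--     hits, count = [], 0
--     for d in dists:
--         hit = ok and d > gap and count >= min_sync_len
--         hits.append(hit)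
--         count = (0 if hit else count) + 1 if abs(d - clock_period) < 2 else 0
--     # Stage 4: the frame starts are the flagged edges, shifted back half a clock.
--     half = int(clock_period * 0.5)
--     return [e - half for e, hit in zip(edges, hits) if hit]
-- ===== Notes on version B (the rewrite author's own statement) =====
-- stated objective: alternative
-- what changed: Replaces A's single streaming per-sample state machine by a four-stage pipeline: run-length encode the sign of the signal and read rising edges off adjacent (negative,positive) run pairs, compute the pairwise edge distances, compute a boolean hit flag per edge with a small scan, and emit the frame starts by a comprehension over the flagged edges.
import Mathlib
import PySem

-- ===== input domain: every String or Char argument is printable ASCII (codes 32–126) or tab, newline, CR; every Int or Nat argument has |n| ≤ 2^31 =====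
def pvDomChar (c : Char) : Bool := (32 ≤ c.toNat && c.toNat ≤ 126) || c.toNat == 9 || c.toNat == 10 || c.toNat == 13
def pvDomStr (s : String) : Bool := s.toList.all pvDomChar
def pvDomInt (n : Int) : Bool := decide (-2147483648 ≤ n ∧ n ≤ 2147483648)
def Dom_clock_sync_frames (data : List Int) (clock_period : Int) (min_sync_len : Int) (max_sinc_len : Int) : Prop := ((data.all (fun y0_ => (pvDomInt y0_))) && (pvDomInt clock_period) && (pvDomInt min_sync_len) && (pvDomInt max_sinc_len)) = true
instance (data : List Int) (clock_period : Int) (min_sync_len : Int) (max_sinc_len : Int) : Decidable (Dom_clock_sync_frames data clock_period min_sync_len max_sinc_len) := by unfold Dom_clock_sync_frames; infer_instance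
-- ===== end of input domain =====

-- B replaces A's streaming per-sample state machine by a four-stage pipeline (sign run-length
-- encoding → edge list → distance list → hit flags → comprehension); same return value,
-- objective: alternative decomposition.

-- ===== PORT A =====
-- Exact model of Python's `int(cp * 1.2)` for |cp| ≤ 2^31: 1.2 as an IEEE double is
-- 5404319552844595/2^52; the product is rounded to nearest-even double (53-bit significand)
-- and then truncated toward zero.  Used verbatim by both ports (both sources contain the
-- very same expression).
def pyIntTimes12 (cp : Int) : Int :=
  let N : Int := cp * 5404319552844595
  let a : Nat := N.natAbs
  let s : Nat := a.log2 + 1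
  let a' : Nat :=
    if s ≤ 53 then a
    else
      let sh := s - 53
      let q := a / 2 ^ sh
      let r := a % 2 ^ sh
      let h := 2 ^ (sh - 1)
      let q' := if r > h ∨ (r = h ∧ q % 2 = 1) then q + 1 else q
      q' * 2 ^ sh
  let res : Int := (a' / 2 ^ 52 : Nat)
  if N < 0 then -res else res

-- Exact model of Python's `int(cp * 0.5)` (exact in doubles for |cp| ≤ 2^31; int() truncates
-- toward zero).  Used verbatim by both ports.
def pyIntHalf (cp : Int) : Int :=
  let r : Int := (cp.natAbs / 2 : Nat)
  if cp < 0 then -r else r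

def clock_sync_frames (data : List Int) (clock_period : Int) (min_sync_len : Int) (max_sinc_len : Int) : List Int :=
  match PySem.List.pyGet? data 0 with
  | none => []   -- data[0] raises IndexError; excluded by Pre_
  | some before_sample0 =>
    let fin := (PySem.List.slice data (some 1) none).foldl
      (fun (st : List Int × Int × Int × Int × Int × Int) sample =>
        let (frame_start, before_sample, edge_count, edge_offset, _prev_edge_offset, current_offset) := st
        if before_sample < 0 ∧ sample > 0 then
          let prev_edge_offset' := edge_offset
          let edge_offset' := current_offset
          let distance := edge_offset' - prev_edge_offset'
          let (frame_start', edge_count') :=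
            if distance > pyIntTimes12 clock_period ∧ edge_count ≥ min_sync_len ∧ min_sync_len ≤ max_sinc_len then
              (frame_start ++ [current_offset - pyIntHalf clock_period], 0)
            else (frame_start, edge_count)
          let edge_count'' := if |distance - clock_period| < 2 then edge_count' + 1 else 0
          (frame_start', sample, edge_count'', edge_offset', prev_edge_offset', current_offset + 1)
        else
          (frame_start, sample, edge_count, edge_offset, _prev_edge_offset, current_offset + 1))
      (([] : List Int), before_sample0, (0 : Int), (0 : Int), (0 : Int), (1 : Int))
    fin.1

-- ===== PORT B =====
def clock_sync_frames_alt (data : List Int) (clock_period : Int) (min_sync_len : Int) (max_sinc_len : Int) : List Int :=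
  -- Stage 1: run-length encode the sign of the signal (append a new (sign, start) run
  -- whenever the sign differs from the last run's sign); rising edges are the starts of
  -- positive runs immediately preceded by negative runs.
  let runs : List (Int × Int) :=
    (PySem.List.enumerate data 0).foldl
      (fun (rs : List (Int × Int)) (ix : Int × Int) =>
        let s : Int := (if ix.2 > 0 then 1 else 0) - (if ix.2 < 0 then 1 else 0)
        match rs.getLast? with
        | none => rs ++ [(s, ix.1)]
        | some last => if last.1 ≠ s then rs ++ [(s, ix.1)] else rs)
      []
  let edges : List Int :=
    (runs.zip (runs.drop 1)).filterMap
      (fun pq => if pq.1.1 < 0 ∧ pq.2.1 > 0 then some pq.2.2 else none)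
  -- Stage 2: distances between successive edges (the first edge measured from 0).
  let dists : List Int := ((0 :: edges).zip edges).map (fun ab => ab.2 - ab.1)
  -- Stage 3: boolean hit flag for each edge.
  let gap := pyIntTimes12 clock_period
  let ok : Prop := min_sync_len ≤ max_sinc_len
  let fin := dists.foldl
    (fun (st : List Bool × Int) d =>
      let hit : Bool := decide (ok ∧ d > gap ∧ st.2 ≥ min_sync_len)
      (st.1 ++ [hit], if |d - clock_period| < 2 then (if hit then 0 else st.2) + 1 else 0))
    (([] : List Bool), (0 : Int))
  let hits := fin.1
  -- Stage 4: frame starts = flagged edges shifted back half a clock.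
  let half := pyIntHalf clock_period
  (edges.zip hits).filterMap (fun eh => if eh.2 then some (eh.1 - half) else none)

-- ===== PRECONDITION & SPEC =====
-- Pre_ excludes only the empty list, on which A raises IndexError reading data[0].
def Pre_clock_sync_frames (data : List Int) (clock_period : Int) (min_sync_len : Int) (max_sinc_len : Int) : Prop := data ≠ []
instance (data : List Int) (clock_period : Int) (min_sync_len : Int) (max_sinc_len : Int) : Decidable (Pre_clock_sync_frames data clock_period min_sync_len max_sinc_len) := by unfold Pre_clock_sync_frames; infer_instance
def pvWitness_clock_sync_frames : List Int × Int × Int × Int := ([-1, 1, -1, 1, -1, 1, 1, -1, 1], 2, 1, 4)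

def Spec_clock_sync_frames (data : List Int) (clock_period : Int) (min_sync_len : Int) (max_sinc_len : Int) (out : List Int) : Prop := out = clock_sync_frames_alt data clock_period min_sync_len max_sinc_len
instance (data : List Int) (clock_period : Int) (min_sync_len : Int) (max_sinc_len : Int) (out : List Int) : Decidable (Spec_clock_sync_frames data clock_period min_sync_len max_sinc_len out) := by unfold Spec_clock_sync_frames; infer_instance

-- ===== CLAIM (what is proved, stated in full; the proofs are below) =====
def Claim_equal_clock_sync_frames : Prop := ∀ (data : List Int) (clock_period : Int) (min_sync_len : Int) (max_sinc_len : Int), Dom_clock_sync_frames data clock_period min_sync_len max_sinc_len → Pre_clock_sync_frames data clock_period min_sync_len max_sinc_len → Spec_clock_sync_frames data clock_period min_sync_len max_sinc_len (clock_sync_frames data clock_period min_sync_len max_sinc_len)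
-- ===== LEMMAS AND PROOFS =====

-- Python's sign `(x > 0) - (x < 0)`.
def sgnI (x : Int) : Int := (if x > 0 then 1 else 0) - (if x < 0 then 1 else 0)

-- Rising-edge offsets of the suffix `xs` when the sign of the sample before `xs` is `s0`
-- and the first element of `xs` sits at offset `i`.
def edgesS (s0 : Int) (xs : List Int) (i : Int) : List Int :=
  match xs with
  | [] => []
  | x :: r => if s0 < 0 ∧ sgnI x > 0 then i :: edgesS (sgnI x) r (i + 1) else edgesS (sgnI x) r (i + 1)

-- Rising-edge offsets phrased on raw samples (the A-side characterisation).
def edgesOf (b : Int) (xs : List Int) (i : Int) : List Int :=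
  match xs with
  | [] => []
  | s :: r => if b < 0 ∧ s > 0 then i :: edgesOf s r (i + 1) else edgesOf s r (i + 1)

lemma sgnI_neg_iff (x : Int) : sgnI x < 0 ↔ x < 0 := by
  unfold sgnI; split_ifs with h1 h2 <;> omega

lemma sgnI_pos_iff (x : Int) : sgnI x > 0 ↔ x > 0 := by
  unfold sgnI; split_ifs with h1 h2 <;> omega

lemma edgesS_sgn (xs : List Int) : ∀ (b : Int) (i : Int), edgesS (sgnI b) xs i = edgesOf b xs i := by
  induction xs with
  | nil => intro b i; rfl
  | cons x r ih =>
    intro b i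
    simp only [edgesS, edgesOf, sgnI_neg_iff, sgnI_pos_iff, ih]

-- Boundary edges of a run list, recursively.
def Erec : List (Int × Int) → List Int
  | [] => []
  | [_] => []
  | p :: q :: r => (if p.1 < 0 ∧ q.1 > 0 then [q.2] else []) ++ Erec (q :: r)

lemma E_eq_Erec :
    ∀ rs : List (Int × Int),
    (rs.zip (rs.drop 1)).filterMap
      (fun pq => if pq.1.1 < 0 ∧ pq.2.1 > 0 then some pq.2.2 else none) = Erec rs := by
  intro rs
  induction rs with
  | nil => rfl
  | cons p t ih =>
    cases t with
    | nil => rfl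
    | cons q r =>
      simp only [List.drop_succ_cons, List.drop_zero, List.zip_cons_cons, List.filterMap_cons] at *
      by_cases h : p.1 < 0 ∧ q.1 > 0
      · simp [Erec, h, ih]
      · simp [Erec, h, ih]

lemma Erec_append (p q : Int × Int) : ∀ rs : List (Int × Int),
    Erec (rs ++ [p, q]) = Erec (rs ++ [p]) ++ (if p.1 < 0 ∧ q.1 > 0 then [q.2] else []) := by
  intro rs
  induction rs with
  | nil => simp [Erec]
  | cons a t ih =>
    cases t with
    | nil => simp [Erec]
    | cons b u =>
      simp only [List.cons_append, Erec] at *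
      rw [ih]
      simp [List.append_assoc]

-- The run-length-encoding fold, starting from a nonempty run list with last run (s0, j),
-- extends the boundary-edge list by exactly `edgesS s0 xs i`.
lemma runfold (cstep : List (Int × Int) → Int × Int → List (Int × Int))
    (hc : ∀ rs ix, cstep rs ix =
      (match rs.getLast? with
       | none => rs ++ [(sgnI ix.2, ix.1)]
       | some last => if last.1 ≠ sgnI ix.2 then rs ++ [(sgnI ix.2, ix.1)] else rs)) :
    ∀ (xs : List Int) (i : Int) (rs : List (Int × Int)) (s0 j : Int),
    Erec ((PySem.List.enumerate xs i).foldl cstep (rs ++ [(s0, j)]))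
      = Erec (rs ++ [(s0, j)]) ++ edgesS s0 xs i := by
  have hstep : ∀ (q : List (Int × Int)) (s0 j : Int) (ix : Int × Int),
      cstep (q ++ [(s0, j)]) ix =
        if s0 ≠ sgnI ix.2 then (q ++ [(s0, j)]) ++ [(sgnI ix.2, ix.1)] else q ++ [(s0, j)] := by
    intro q s0 j ix
    rw [hc]
    simp
  intro xs
  induction xs with
  | nil => intro i rs s0 j; simp [PySem.List.enumerate_nil, edgesS]
  | cons x r ih =>
    intro i rs s0 j
    rw [PySem.List.enumerate_cons, List.foldl_cons, hstep rs s0 j (i, x)]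
    by_cases h : s0 = sgnI x
    · subst h
      rw [if_neg (by simp)]
      rw [ih (i + 1) rs (sgnI x) j]
      have hh : edgesS (sgnI x) (x :: r) i = edgesS (sgnI x) r (i + 1) := by
        simp only [edgesS]
        rw [if_neg (by omega)]
      rw [hh]
    · rw [if_pos (by simpa using h)]
      rw [show (rs ++ [(s0, j)]) ++ [(sgnI (i, x).2, (i, x).1)] = (rs ++ [(s0, j)]) ++ [(sgnI x, i)] from rfl]
      rw [ih (i + 1) (rs ++ [(s0, j)]) (sgnI x) i]
      have happ : Erec ((rs ++ [(s0, j)]) ++ [(sgnI x, i)])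
          = Erec (rs ++ [(s0, j)]) ++ (if s0 < 0 ∧ sgnI x > 0 then [i] else []) := by
        have := Erec_append (s0, j) (sgnI x, i) rs
        simpa [List.append_assoc] using this
      rw [happ]
      simp only [edgesS]
      by_cases hb : s0 < 0 ∧ sgnI x > 0
      · simp [hb, List.append_assoc]
      · simp [hb]

-- Starting from the empty run list on nonempty data.
lemma runfold0 (cstep : List (Int × Int) → Int × Int → List (Int × Int))
    (hc : ∀ rs ix, cstep rs ix =
      (match rs.getLast? with
       | none => rs ++ [(sgnI ix.2, ix.1)]
       | some last => if last.1 ≠ sgnI ix.2 then rs ++ [(sgnI ix.2, ix.1)] else rs))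
    (x : Int) (r : List Int) :
    Erec ((PySem.List.enumerate (x :: r) 0).foldl cstep []) = edgesOf x r 1 := by
  rw [PySem.List.enumerate_cons, List.foldl_cons, hc]
  have h0 : cstep [] (0, x) = [] ++ [(sgnI x, 0)] := by rw [hc]; rfl
  show Erec ((PySem.List.enumerate r (0 + 1)).foldl cstep (match ([] : List (Int × Int)).getLast? with
       | none => [] ++ [(sgnI x, (0 : Int))]
       | some last => if last.1 ≠ sgnI x then [] ++ [(sgnI x, 0)] else [])) = edgesOf x r 1
  show Erec ((PySem.List.enumerate r (0 + 1)).foldl cstep ([] ++ [(sgnI x, 0)])) = edgesOf x r 1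
  rw [runfold cstep hc r (0 + 1) [] (sgnI x) 0]
  simp only [List.nil_append, show Erec [(sgnI x, (0 : Int))] = [] from rfl]
  rw [show ((0 : Int) + 1) = 1 from rfl, edgesS_sgn r x 1]

-- B's stages 2–4 over an edge list, recursively.
def framesB (cp mn mx : Int) : List Int → Int → Int → List Int
  | [], _, _ => []
  | e :: r, p, c =>
    let d := e - p
    if mn ≤ mx ∧ d > pyIntTimes12 cp ∧ c ≥ mn then
      (e - pyIntHalf cp) :: framesB cp mn mx r e (if |d - cp| < 2 then 0 + 1 else 0)
    else
      framesB cp mn mx r e (if |d - cp| < 2 then c + 1 else 0)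

-- A's per-sample loop, run from before-sample b / edge_offset eo / current_offset i, produces
-- fs ++ framesB over the rising edges of the suffix.
lemma loopA_eq_frames (cp mn mx : Int) (xs : List Int) :
    ∀ (b : Int) (fs : List Int) (ec eo peo i : Int),
    (xs.foldl
      (fun (st : List Int × Int × Int × Int × Int × Int) sample =>
        let (frame_start, before_sample, edge_count, edge_offset, _prev_edge_offset, current_offset) := st
        if before_sample < 0 ∧ sample > 0 then
          let prev_edge_offset' := edge_offset
          let edge_offset' := current_offset
          let distance := edge_offset' - prev_edge_offset'
          let (frame_start', edge_count') :=
            if distance > pyIntTimes12 cp ∧ edge_count ≥ mn ∧ mn ≤ mx then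
              (frame_start ++ [current_offset - pyIntHalf cp], 0)
            else (frame_start, edge_count)
          let edge_count'' := if |distance - cp| < 2 then edge_count' + 1 else 0
          (frame_start', sample, edge_count'', edge_offset', prev_edge_offset', current_offset + 1)
        else
          (frame_start, sample, edge_count, edge_offset, _prev_edge_offset, current_offset + 1))
      (fs, b, ec, eo, peo, i)).1
    = fs ++ framesB cp mn mx (edgesOf b xs i) eo ec := by
  induction xs with
  | nil => intro b fs ec eo peo i; simp [edgesOf, framesB]
  | cons s r ih =>
    intro b fs ec eo peo i
    by_cases h : b < 0 ∧ s > 0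
    · simp only [edgesOf, if_pos h, List.foldl_cons, if_pos h]
      by_cases hc : i - eo > pyIntTimes12 cp ∧ ec ≥ mn ∧ mn ≤ mx
      · have hc' : mn ≤ mx ∧ i - eo > pyIntTimes12 cp ∧ ec ≥ mn := by tauto
        simp only [if_pos hc]
        rw [ih s (fs ++ [i - pyIntHalf cp]) _ i eo (i + 1)]
        simp [framesB, hc', List.append_assoc]
      · have hc' : ¬ (mn ≤ mx ∧ i - eo > pyIntTimes12 cp ∧ ec ≥ mn) := by tauto
        simp only [if_neg hc]
        rw [ih s fs _ i eo (i + 1)]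
        simp [framesB, hc']
    · simp only [edgesOf, if_neg h, List.foldl_cons, if_neg h]
      exact ih s fs ec eo peo (i + 1)

-- The hit-flag scan of B over the distances of (p :: es), recursively.
def hitsApp (cp mn mx : Int) : List Int → Int → List Bool
  | [], _ => []
  | d :: r, c =>
    let hit : Bool := decide (mn ≤ mx ∧ d > pyIntTimes12 cp ∧ c ≥ mn)
    hit :: hitsApp cp mn mx r (if |d - cp| < 2 then (if hit then 0 else c) + 1 else 0)

lemma hits_foldl (cp mn mx : Int) (step : List Bool × Int → Int → List Bool × Int)
    (hs : ∀ st d, step st d =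
      (st.1 ++ [decide (mn ≤ mx ∧ d > pyIntTimes12 cp ∧ st.2 ≥ mn)],
       if |d - cp| < 2 then (if decide (mn ≤ mx ∧ d > pyIntTimes12 cp ∧ st.2 ≥ mn) then 0 else st.2) + 1 else 0)) :
    ∀ (ds : List Int) (acc : List Bool) (c : Int),
    (ds.foldl step (acc, c)).1 = acc ++ hitsApp cp mn mx ds c := by
  intro ds
  induction ds with
  | nil => intro acc c; simp [hitsApp]
  | cons d r ih =>
    intro acc c
    rw [List.foldl_cons, hs]
    rw [ih]
    simp [hitsApp, List.append_assoc]

-- Zipping the edges with their hit flags and filtering recovers framesB.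
lemma zip_hits_frames (cp mn mx : Int) :
    ∀ (es : List Int) (p c : Int),
    (es.zip (hitsApp cp mn mx (((p :: es).zip es).map (fun ab => ab.2 - ab.1)) c)).filterMap
      (fun eh => if eh.2 then some (eh.1 - pyIntHalf cp) else none)
    = framesB cp mn mx es p c := by
  intro es
  induction es with
  | nil => intro p c; rfl
  | cons e r ih =>
    intro p c
    by_cases h : mn ≤ mx ∧ e - p > pyIntTimes12 cp ∧ c ≥ mn
    · have hd : (decide (mn ≤ mx ∧ e - p > pyIntTimes12 cp ∧ c ≥ mn)) = true := by
        simpa using h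
      simp only [List.map_cons, List.zip_cons_cons, hitsApp, hd, framesB, if_pos h,
        List.filterMap_cons, if_true, reduceIte]
      rw [ih e (if |e - p - cp| < 2 then 0 + 1 else 0)]
    · have hd : (decide (mn ≤ mx ∧ e - p > pyIntTimes12 cp ∧ c ≥ mn)) = false := by
        simpa using h
      simp only [List.map_cons, List.zip_cons_cons, hitsApp, hd, framesB, if_neg h,
        List.filterMap_cons, Bool.false_eq_true, if_false, reduceIte]
      rw [ih e (if |e - p - cp| < 2 then c + 1 else 0)]

-- ===== VERDICT (by name: the statements are the Claim_ definitions above) =====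
theorem clock_sync_frames_spec : Claim_equal_clock_sync_frames := by
  intro data cp mn mx _hD hP
  obtain ⟨d0, rest, rfl⟩ : ∃ d0 rest, data = d0 :: rest := by
    cases data with
    | nil => exact absurd rfl hP
    | cons a l => exact ⟨a, l, rfl⟩
  show clock_sync_frames (d0 :: rest) cp mn mx = clock_sync_frames_alt (d0 :: rest) cp mn mx
  unfold clock_sync_frames clock_sync_frames_alt
  simp only [PySem.List.pyGet?_zero_cons, PySem.List.slice_from_one, List.tail_cons]
  -- A side
  rw [loopA_eq_frames cp mn mx rest d0 [] 0 0 0 1]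
  simp only [List.nil_append]
  -- B side, stage 1: the run fold yields a run list whose boundary edges are edgesOf d0 rest 1
  rw [E_eq_Erec,
    runfold0 (fun (rs : List (Int × Int)) (ix : Int × Int) =>
      match rs.getLast? with
      | none => rs ++ [((if ix.2 > 0 then 1 else 0) - (if ix.2 < 0 then 1 else 0), ix.1)]
      | some last =>
        if last.1 ≠ (if ix.2 > 0 then 1 else 0) - (if ix.2 < 0 then 1 else 0) then
          rs ++ [((if ix.2 > 0 then 1 else 0) - (if ix.2 < 0 then 1 else 0), ix.1)]
        else rs)
      (fun _ _ => rfl) d0 rest]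
  -- B side, stages 2–4
  rw [hits_foldl cp mn mx
    (fun (st : List Bool × Int) (d : Int) =>
      (st.1 ++ [decide (mn ≤ mx ∧ d > pyIntTimes12 cp ∧ st.2 ≥ mn)],
       if |d - cp| < 2 then (if decide (mn ≤ mx ∧ d > pyIntTimes12 cp ∧ st.2 ≥ mn) = true then 0 else st.2) + 1 else 0))
    (fun _ _ => rfl) _ [] 0]
  simp only [List.nil_append]
  exact (zip_hits_frames cp mn mx (edgesOf d0 rest 1) 0 0).symm
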